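-- pv_equiv track=rewrite | github.com/joco-nz/dxf2gcode-plasma | source/dxf2gcode/globals/helperfunctions.py | a2u
-- ===== SOURCE A (Python) =====
-- def a2u(text):
--     """
--     Convert ASCII string with encoded chars like \ U + xxxx to Python Unicode strings.
--     """
--     cur = 0
--     out = str()
--     while cur < len(text):
--         idx = text.find('\\U+', cur)
--         if idx < 0:
--             out += text[cur:]
--             break
--
--         out += text[cur:idx]
--         for cur in range(idx + 3, len(text) + 1):
--             if cur == len (text):
--                 break
--             if "0123456789abcdefABCDEF".find(text[cur]) < 0:
--                 break
--
--         if cur == idx + 3: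
--             # "\U+" without following digits; copy to output as-is
--             out += text[idx:cur]
--             continue
--
--         out += chr(int(text[idx+3:cur], 16))
--
--     return out
-- ===== SOURCE B (Python) =====
-- import re
--
-- _ESC = re.compile(r'\\U\+([0-9a-fA-F]+)')
--
-- def a2u(text):
--     # One regex substitution: each maximal hex run after '\U+' becomes chr of its
--     # hex value; a '\U+' with no following hex digit fails to match and stays as-is.
--     return _ESC.sub(lambda m: chr(int(m.group(1), 16)), text)
-- ===== Notes on version B (the rewrite author's own statement) =====
-- stated objective: idiomatic
-- what changed: Replaced the hand-rolled while-loop with find/index arithmetic and an inner for-scan by a single regex substitution re.sub(r'\\U\+([0-9a-fA-F]+)', lambda m: chr(int(m.group(1), 16)), text).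
import Mathlib
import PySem

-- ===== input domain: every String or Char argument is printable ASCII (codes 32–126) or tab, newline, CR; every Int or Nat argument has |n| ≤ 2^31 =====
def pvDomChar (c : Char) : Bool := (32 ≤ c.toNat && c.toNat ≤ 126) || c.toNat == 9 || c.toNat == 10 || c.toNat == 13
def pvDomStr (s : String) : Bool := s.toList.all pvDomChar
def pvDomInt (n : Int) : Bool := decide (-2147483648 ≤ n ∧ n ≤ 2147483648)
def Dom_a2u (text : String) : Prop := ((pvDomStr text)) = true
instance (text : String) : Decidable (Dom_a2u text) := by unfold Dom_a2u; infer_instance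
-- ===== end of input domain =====

-- B replaces A's hand-rolled find/index-arithmetic loop by a single regex substitution
-- (re.sub r'\\U\+([0-9a-fA-F]+)' with a chr callback); equivalence of the return values is proved below.


-- ===== PORT A =====
-- shared helpers: the escape marker '\U+', Python's "0123456789abcdefABCDEF" digit test,
-- and int(s, 16) on a string of hex digits (exact for hex-digit characters)
def pvPat : List Char := ['\\', 'U', '+']
def pvIsHex (c : Char) : Bool := "0123456789abcdefABCDEF".toList.contains c
def pvHexDigitVal (c : Char) : Nat :=
  if c.toNat ≤ 57 then c.toNat - 48 else if c.toNat ≤ 70 then c.toNat - 55 else c.toNat - 87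
def pvHexVal (l : List Char) : Nat := l.foldl (fun a c => 16 * a + pvHexDigitVal c) 0

-- A's inner `for cur in range(idx+3, len(text)+1)` with its two breaks:
-- advance cur while in range and text[cur] is a hex digit
def a2uScan (text : List Char) (cur : Nat) : Nat :=
  if h : cur < text.length then
    if pvIsHex text[cur] then a2uScan text (cur + 1) else cur
  else cur
termination_by text.length - cur

-- needed by a2uLoop's termination proof
theorem a2uScan_ge (text : List Char) (cur : Nat) : cur ≤ a2uScan text cur := by
  fun_induction a2uScan text cur <;> omega

-- A's outer while loop; `out` is the accumulated output string
def a2uLoop (text : List Char) (cur : Nat) (out : List Char) : List Char :=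
  if hcur : cur < text.length then
    let idx := PySem.Chars.findFrom text pvPat (cur : Int) none   -- text.find('\U+', cur)
    if hidx : idx < 0 then
      out ++ text.drop cur                                        -- out += text[cur:]; break
    else
      let i := idx.toNat
      let out2 := out ++ (text.drop cur).take (i - cur)           -- out += text[cur:idx]
      let cur' := a2uScan text (i + 3)                            -- the for-loop's final cur
      if cur' = i + 3 then
        a2uLoop text cur' (out2 ++ (text.drop i).take (cur' - i)) -- out += text[idx:cur]
      else
        a2uLoop text cur'
          (out2 ++ [Char.ofNat (pvHexVal ((text.drop (i + 3)).take (cur' - (i + 3))))])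
                                                                  -- out += chr(int(text[idx+3:cur], 16))
  else out
termination_by text.length - cur
decreasing_by
  all_goals
    have h2 := a2uScan_ge text ((PySem.Chars.findFrom text pvPat (cur : Int) none).toNat + 3)
    have h3 := (PySem.Chars.findFrom_natCast_spec text pvPat cur (Nat.le_of_lt hcur)
      (by intro h
          exact hidx (show PySem.Chars.findFrom text pvPat (cur : Int) none < 0 by
            rw [h]; decide))).1
    omega

def a2u (text : String) : String := String.mk (a2uLoop text.toList 0 [])

-- ===== PORT B =====
-- Port of Source B's single substitution  re.sub(r'\\U\+([0-9a-fA-F]+)', lambda m: chr(int(m.group(1),16)), text):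
-- re.sub scans left to right; at each position it either matches '\U+' followed by the maximal
-- non-empty hex-digit run (replaced by chr of its hex value) or copies one character. Exact.
def a2uAltGo (l : List Char) : List Char :=
  match l with
  | [] => []
  | c :: rest =>
    if pvPat.isPrefixOf (c :: rest) then
      let hex := (rest.drop 2).takeWhile pvIsHex
      if hex.isEmpty then '\\' :: 'U' :: '+' :: a2uAltGo (rest.drop 2)
      else Char.ofNat (pvHexVal hex) :: a2uAltGo ((rest.drop 2).dropWhile pvIsHex)
    else c :: a2uAltGo rest
termination_by l.length
decreasing_by
  · simp
  · have h1 := List.length_dropWhile_le pvIsHex (rest.drop 2)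
    simp at h1 ⊢; omega
  · simp

def a2u_alt (text : String) : String := String.mk (a2uAltGo text.toList)

-- ===== PRECONDITION & SPEC =====
-- Pre_ excludes inputs containing a '\U+' escape whose hex digits denote a value that is not a
-- valid Unicode scalar: above 0x10FFFF the Python A raises ValueError (chr), and in the surrogate
-- range 0xD800–0xDFFF it returns a lone-surrogate string that a Lean String cannot represent.
def Pre_a2u (text : String) : Prop :=
  ∀ i, i < text.toList.length →
    pvPat.isPrefixOf (text.toList.drop i) = true →
    ((text.toList.drop (i + 3)).takeWhile pvIsHex).isEmpty = false →
    (pvHexVal ((text.toList.drop (i + 3)).takeWhile pvIsHex) < 55296 ∨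
      (57344 ≤ pvHexVal ((text.toList.drop (i + 3)).takeWhile pvIsHex) ∧
        pvHexVal ((text.toList.drop (i + 3)).takeWhile pvIsHex) < 1114112))
instance (text : String) : Decidable (Pre_a2u text) := by unfold Pre_a2u; infer_instance

def pvWitness_a2u : String := "a\\U+41z"

def Spec_a2u (text : String) (out : String) : Prop := out = a2u_alt text
instance (text : String) (out : String) : Decidable (Spec_a2u text out) := by unfold Spec_a2u; infer_instance

-- ===== CLAIM (what is proved, stated in full; the proofs are below) =====
def Claim_equal_a2u : Prop := ∀ (text : String), Dom_a2u text → Pre_a2u text → Spec_a2u text (a2u text)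

-- ===== LEMMAS AND PROOFS =====

theorem pv_take_takeWhile (p : Char → Bool) (l : List Char) :
    l.take (l.takeWhile p).length = l.takeWhile p := by
  have h := List.takeWhile_prefix (l := l) (p := p)
  exact ((List.prefix_iff_eq_take).1 h).symm

theorem pv_drop_takeWhile (p : Char → Bool) (l : List Char) :
    l.drop (l.takeWhile p).length = l.dropWhile p := by
  have h2 : (l.takeWhile p ++ l.dropWhile p).drop (l.takeWhile p).length = l.dropWhile p :=
    List.drop_left
  rwa [List.takeWhile_append_dropWhile] at h2

theorem a2uScan_eq (text : List Char) (cur : Nat) :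
    a2uScan text cur = cur + ((text.drop cur).takeWhile pvIsHex).length := by
  fun_induction a2uScan text cur with
  | case1 cur h hhex ih =>
    rw [List.drop_eq_getElem_cons h, List.takeWhile_cons_of_pos hhex]
    simp [ih]; omega
  | case2 cur h hhex =>
    rw [List.drop_eq_getElem_cons h, List.takeWhile_cons_of_neg hhex]
    simp
  | case3 cur h =>
    rw [List.drop_of_length_le (by omega)]
    simp

-- if the pattern is a prefix nowhere, the scanner copies the list unchanged
theorem altGo_copy (l : List Char) (h : ∀ j, ¬ pvPat <+: l.drop j) : a2uAltGo l = l := by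
  induction l with
  | nil => simp [a2uAltGo]
  | cons c rest ih =>
    have h0 : pvPat.isPrefixOf (c :: rest) = false := by
      rw [Bool.eq_false_iff]; intro hb
      exact h 0 (by simpa using (List.isPrefixOf_iff_prefix).1 hb)
    rw [a2uAltGo, h0]
    simp only [Bool.false_eq_true, if_false]
    rw [ih (fun j => by simpa using h (j + 1))]

-- a pattern-free prefix passes through the scanner untouched
theorem altGo_split (p q : List Char) (h : ∀ j, j < p.length → ¬ pvPat <+: (p ++ q).drop j) :
    a2uAltGo (p ++ q) = p ++ a2uAltGo q := by
  induction p with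
  | nil => simp
  | cons c p' ih =>
    have h0 : pvPat.isPrefixOf (c :: (p' ++ q)) = false := by
      rw [Bool.eq_false_iff]; intro hb
      exact h 0 (by simp) (by simpa using (List.isPrefixOf_iff_prefix).1 hb)
    rw [List.cons_append, a2uAltGo, h0]
    simp only [Bool.false_eq_true, if_false]
    rw [ih (fun j hj => by simpa using h (j + 1) (by simp; omega))]
    simp

theorem altGo_esc (m : List Char) :
    a2uAltGo ('\\' :: 'U' :: '+' :: m) =
      if (m.takeWhile pvIsHex).isEmpty then '\\' :: 'U' :: '+' :: a2uAltGo m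
      else Char.ofNat (pvHexVal (m.takeWhile pvIsHex)) :: a2uAltGo (m.dropWhile pvIsHex) := by
  rw [a2uAltGo]
  simp [pvPat, List.isPrefixOf]

-- a prefix of a later suffix is an infix of an earlier suffix
theorem pv_prefix_drop_infix (l : List Char) (k j : Nat) (hk : k ≤ j) (h : pvPat <+: l.drop j) :
    pvPat <:+: l.drop k := by
  have hs : l.drop j <:+ l.drop k := by
    have : (l.drop k).drop (j - k) = l.drop j := by rw [List.drop_drop]; congr 1; omega
    rw [← this]; exact List.drop_suffix _ _
  exact h.isInfix.trans hs.isInfix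

-- main invariant: A's loop from position cur produces out ++ (B's scanner on the rest)
theorem a2uLoop_eq (text : List Char) :
    ∀ n cur out, text.length - cur ≤ n →
      a2uLoop text cur out = out ++ a2uAltGo (text.drop cur) := by
  intro n
  induction n with
  | zero =>
    intro cur out h
    rw [a2uLoop, dif_neg (by omega)]
    rw [List.drop_of_length_le (by omega)]
    simp [a2uAltGo]
  | succ n ih =>
    intro cur out h
    rw [a2uLoop]
    by_cases hcur : cur < text.length
    · rw [dif_pos hcur]
      dsimp only
      by_cases hneg : PySem.Chars.findFrom text pvPat (cur : Int) none < 0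
      · -- no further occurrence: copy the tail
        rw [dif_pos hneg]
        have hm1 : PySem.Chars.findFrom text pvPat (cur : Int) none = -1 := by
          by_contra hne
          have := (PySem.Chars.findFrom_natCast_spec text pvPat cur (Nat.le_of_lt hcur) hne).1
          omega
        have hnin := (PySem.Chars.findFrom_natCast_eq_neg_one_iff text pvPat cur
          (Nat.le_of_lt hcur)).1 hm1
        rw [altGo_copy (text.drop cur) (fun j hj => by
          rw [List.drop_drop] at hj
          exact hnin (pv_prefix_drop_infix text cur (cur + j) (by omega) hj))]
      · -- an occurrence at idx = i
        rw [dif_neg hneg]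
        have hne : PySem.Chars.findFrom text pvPat (cur : Int) none ≠ -1 := by
          intro hh; rw [hh] at hneg; exact hneg (by decide)
        obtain ⟨hge, hpre, hmin⟩ :=
          PySem.Chars.findFrom_natCast_spec text pvPat cur (Nat.le_of_lt hcur) hne
        set i := (PySem.Chars.findFrom text pvPat (cur : Int) none).toNat with hi
        have hcuri : cur ≤ i := by omega
        obtain ⟨t, ht⟩ := hpre
        have hdd : (text.drop i).drop 3 = text.drop (i + 3) := by rw [List.drop_drop]
        have h3 : t = text.drop (i + 3) := by
          have hcg := congrArg (List.drop 3) ht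
          rw [hdd] at hcg
          simpa [pvPat] using hcg
        have hdropi : text.drop i = '\\' :: 'U' :: '+' :: text.drop (i + 3) := by
          rw [← ht, h3]; rfl
        have hlen3 : i + 3 ≤ text.length := by
          have hlg := congrArg List.length hdropi
          simp at hlg; omega
        -- split B's scanner at position i
        have hpq : (text.drop cur).take (i - cur) ++ text.drop i = text.drop cur := by
          have hdd2 : (text.drop cur).drop (i - cur) = text.drop i := by
            rw [List.drop_drop]; congr 1; omega
          rw [← hdd2, List.take_append_drop]
        have hsplit := altGo_split ((text.drop cur).take (i - cur)) (text.drop i)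
          (fun j hj hb => by
            rw [hpq, List.drop_drop] at hb
            have hjl : j < i - cur := by
              have := List.length_take_le (i - cur) (text.drop cur); omega
            exact hmin (cur + j) (by omega) (by omega) hb)
        rw [hpq] at hsplit
        rw [hsplit, hdropi, altGo_esc]
        have hscan := a2uScan_eq text (i + 3)
        by_cases hemp : ((text.drop (i + 3)).takeWhile pvIsHex).isEmpty
        · -- '\\U+' without digits: copied as-is
          have hnil : (text.drop (i + 3)).takeWhile pvIsHex = [] := by
            simpa [List.isEmpty_iff] using hemp
          have hcur' : a2uScan text (i + 3) = i + 3 := by rw [hscan, hnil]; rfl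
          rw [if_pos hcur', if_pos hemp]
          have htake3 : List.take (a2uScan text (i + 3) - i) ('\\' :: 'U' :: '+' :: text.drop (i + 3)) =
              ['\\', 'U', '+'] := by
            rw [hcur']
            have h33 : i + 3 - i = 3 := by omega
            rw [h33]; rfl
          rw [htake3, ih (a2uScan text (i + 3)) _ (by omega), hcur']
          simp
        · -- '\\U+' with a hex run: one replacement character
          have hne' : (text.drop (i + 3)).takeWhile pvIsHex ≠ [] := by
            intro hnil; rw [hnil] at hemp; exact hemp rfl
          have hlenpos : 0 < ((text.drop (i + 3)).takeWhile pvIsHex).length :=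
            List.length_pos_of_ne_nil hne'
          rw [if_neg (by omega), if_neg hemp]
          have htakehex : (text.drop (i + 3)).take (a2uScan text (i + 3) - (i + 3)) =
              (text.drop (i + 3)).takeWhile pvIsHex := by
            rw [hscan, Nat.add_sub_cancel_left, pv_take_takeWhile]
          have hdropw : text.drop (a2uScan text (i + 3)) =
              (text.drop (i + 3)).dropWhile pvIsHex := by
            rw [← pv_drop_takeWhile pvIsHex (text.drop (i + 3)), List.drop_drop, hscan]
          rw [htakehex, ih (a2uScan text (i + 3)) _ (by omega), hdropw]
          simp
    · rw [dif_neg hcur]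
      rw [List.drop_of_length_le (by omega)]
      simp [a2uAltGo]

-- ===== VERDICT (by name: the statement is the Claim_ definition above) =====
theorem a2u_spec : Claim_equal_a2u := by
  intro text _ _
  unfold Spec_a2u a2u a2u_alt
  rw [a2uLoop_eq text.toList text.toList.length 0 [] (by omega)]
  rfl
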